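-- pv_equiv track=rewrite | github.com/AprilYuge/ATAC-annotation-benchmark | G3/scripts/JAMIE.py | rename_duplicates
-- ===== SOURCE A (Python) =====
-- def rename_duplicates(strings):
--     renamed = []
--     counts = {}
--     for string in strings:
--         if string in counts:
--             count = counts[string]
--             new_name = f"{string}_{count}"
--             counts[string] += 1
--         else:
--             new_name = string
--             counts[string] = 1
--         renamed.append(new_name)
--     return renamed
-- ===== SOURCE B (Python) =====
-- def rename_duplicates(strings):
--     remaining = {}
--     for s in strings:
--         remaining[s] = remaining.get(s, 0) + 1
--     out = []
--     for s in reversed(strings):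
--         c = remaining[s] - 1
--         remaining[s] = c
--         out.append(s if c == 0 else f"{s}_{c}")
--     out.reverse()
--     return out
-- ===== Notes on version B (the rewrite author's own statement) =====
-- stated objective: alternative
-- what changed: Instead of maintaining past-occurrence counts while scanning forward, B first tallies total occurrences and then builds the output back-to-front, decrementing the remaining (future) count of each string to recover its prefix count.
import Mathlib
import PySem

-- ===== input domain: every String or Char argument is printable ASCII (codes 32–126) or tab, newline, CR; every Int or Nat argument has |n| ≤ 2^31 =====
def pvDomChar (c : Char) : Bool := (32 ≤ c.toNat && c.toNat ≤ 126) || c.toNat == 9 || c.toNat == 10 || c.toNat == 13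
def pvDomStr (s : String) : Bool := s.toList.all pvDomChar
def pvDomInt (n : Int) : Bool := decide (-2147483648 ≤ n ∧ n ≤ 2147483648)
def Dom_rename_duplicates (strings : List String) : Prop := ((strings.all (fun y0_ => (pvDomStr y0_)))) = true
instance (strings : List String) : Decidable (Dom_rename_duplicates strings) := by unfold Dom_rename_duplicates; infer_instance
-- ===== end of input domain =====

-- B tallies total occurrences first, then builds the output back-to-front from remaining (future) counts: alternative decomposition, same cost.
-- ===== PORT A =====
-- loop state: (renamed, counts); dict holds Python ints
def rename_duplicates (strings : List String) : List String :=
  (strings.foldl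
    (fun (st : List String × PySem.Dict String Int) string =>
      match st.2.get? string with
      | some count =>
          (st.1 ++ [string ++ "_" ++ PySem.Int.toStr count], st.2.insert string (count + 1))
      | none =>
          (st.1 ++ [string], st.2.insert string 1))
    ([], PySem.Dict.empty)).1

-- ===== PORT B =====
-- pass 1: remaining[s] = remaining.get(s,0)+1; pass 2 over reversed(strings):
-- remaining[s] always present there, so the KeyError-raising lookup is exactly getD s 0
def rename_duplicates_alt (strings : List String) : List String :=
  let remaining := strings.foldl (fun (d : PySem.Dict String Int) s => d.insert s (d.getD s 0 + 1)) PySem.Dict.empty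
  let out := (strings.reverse.foldl
    (fun (st : List String × PySem.Dict String Int) s =>
      let c := st.2.getD s 0 - 1
      (st.1 ++ [if c = 0 then s else s ++ "_" ++ PySem.Int.toStr c], st.2.insert s c))
    ([], remaining)).1
  out.reverse

-- ===== PRECONDITION & SPEC =====
def Spec_rename_duplicates (strings : List String) (out : List String) : Prop := out = rename_duplicates_alt strings
instance (strings : List String) (out : List String) : Decidable (Spec_rename_duplicates strings out) := by unfold Spec_rename_duplicates; infer_instance

-- ===== CLAIM (what is proved, stated in full; the proofs are below) =====
def Claim_equal_rename_duplicates : Prop := ∀ (strings : List String), Dom_rename_duplicates strings → Spec_rename_duplicates strings (rename_duplicates strings)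

-- ===== LEMMAS AND PROOFS =====

-- the common recursive specification: rename suf, given already-seen prefix pre
def renameFrom : List String → List String → List String
  | _, [] => []
  | pre, s :: t =>
      (if pre.count s = 0 then s else s ++ "_" ++ PySem.Int.toStr ((pre.count s : Nat) : Int))
        :: renameFrom (pre ++ [s]) t

def dictInv (pre : List String) (d : PySem.Dict String Int) : Prop :=
  ∀ s, d.get? s = if pre.count s = 0 then none else some ((pre.count s : Nat) : Int)

theorem count_append_singleton (pre : List String) (s x : String) :
    (pre ++ [s]).count x = pre.count x + (if x = s then 1 else 0) := by
  rcases eq_or_ne x s with h | h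
  · subst h; simp [List.count_append]
  · simp [List.count_append, h, Ne.symm h]

theorem loop_inv (t : List String) : ∀ (pre acc : List String) (d : PySem.Dict String Int),
    dictInv pre d →
    (t.foldl
      (fun (st : List String × PySem.Dict String Int) string =>
        match st.2.get? string with
        | some count =>
            (st.1 ++ [string ++ "_" ++ PySem.Int.toStr count], st.2.insert string (count + 1))
        | none =>
            (st.1 ++ [string], st.2.insert string 1))
      (acc, d)).1 = acc ++ renameFrom pre t := by
  induction t with
  | nil => intro pre acc d _; simp [renameFrom]
  | cons s t ih =>
      intro pre acc d hinv
      have hs := hinv s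
      simp only [List.foldl_cons]
      by_cases hc : pre.count s = 0
      · rw [hs, if_pos hc]
        show (List.foldl _ (acc ++ [s], d.insert s 1) t).1 = acc ++ renameFrom pre (s :: t)
        rw [ih (pre ++ [s]) (acc ++ [s]) _ ?_]
        · simp [renameFrom, hc]
        · intro x
          rw [PySem.Dict.get?_insert, count_append_singleton]
          by_cases hx : x = s
          · subst hx; simp [hc]
          · simp only [hx, if_false, Nat.add_zero]
            exact hinv x
      · rw [hs, if_neg hc]
        show (List.foldl _ (acc ++ [s ++ "_" ++ PySem.Int.toStr ((pre.count s : Nat) : Int)],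
            d.insert s (((pre.count s : Nat) : Int) + 1)) t).1 = acc ++ renameFrom pre (s :: t)
        rw [ih (pre ++ [s]) (acc ++ [s ++ "_" ++ PySem.Int.toStr ((pre.count s : Nat) : Int)]) _ ?_]
        · simp [renameFrom, hc]
        · intro x
          rw [PySem.Dict.get?_insert, count_append_singleton]
          by_cases hx : x = s
          · subst hx; simp [hc]
          · simp only [hx, if_false, Nat.add_zero]
            exact hinv x

theorem a_eq (l : List String) : rename_duplicates l = renameFrom [] l := by
  have := loop_inv l [] [] PySem.Dict.empty (by intro s; simp [PySem.Dict.get?, PySem.Dict.empty])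
  simpa [rename_duplicates] using this

-- B side --

-- pass 1 tallies counts
theorem counter_inv (t : List String) : ∀ (d : PySem.Dict String Int) (x : String),
    (t.foldl (fun (d : PySem.Dict String Int) s => d.insert s (d.getD s 0 + 1)) d).getD x 0
      = d.getD x 0 + (t.count x : Int) := by
  induction t with
  | nil => intro d x; simp
  | cons s t ih =>
      intro d x
      rw [List.foldl_cons, ih, PySem.Dict.getD_insert]
      by_cases hx : x = s
      · subst hx; simp; ring
      · simp [hx, Ne.symm hx]

theorem renameFrom_append (t : List String) : ∀ (pre : List String) (s : String),
    renameFrom pre (t ++ [s]) = renameFrom pre t ++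
      [if (pre ++ t).count s = 0 then s
       else s ++ "_" ++ PySem.Int.toStr (((pre ++ t).count s : Nat) : Int)] := by
  induction t with
  | nil => intro pre s; simp [renameFrom]
  | cons u t ih =>
      intro pre s
      simp only [List.cons_append, renameFrom, ih (pre ++ [u]) s, List.append_assoc,
        List.cons_append, List.nil_append]

-- pass 2: folding over r with remaining counts for pre ++ r.reverse yields the reversed names
theorem rev_loop (r : List String) : ∀ (pre acc : List String) (d : PySem.Dict String Int),
    (∀ x, d.getD x 0 = ((pre ++ r.reverse).count x : Int)) →
    (r.foldl
      (fun (st : List String × PySem.Dict String Int) s =>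
        let c := st.2.getD s 0 - 1
        (st.1 ++ [if c = 0 then s else s ++ "_" ++ PySem.Int.toStr c], st.2.insert s c))
      (acc, d)).1 = acc ++ (renameFrom pre r.reverse).reverse := by
  induction r with
  | nil => intro pre acc d _; simp [renameFrom]
  | cons s r ih =>
      intro pre acc d hinv
      have hrev : (s :: r).reverse = r.reverse ++ [s] := by simp
      have hc : d.getD s 0 - 1 = (((pre ++ r.reverse).count s : Nat) : Int) := by
        rw [hinv s, hrev, ← List.append_assoc, List.count_append]
        simp
      have hname : (if d.getD s 0 - 1 = 0 then s else s ++ "_" ++ PySem.Int.toStr (d.getD s 0 - 1))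
          = (if (pre ++ r.reverse).count s = 0 then s
             else s ++ "_" ++ PySem.Int.toStr (((pre ++ r.reverse).count s : Nat) : Int)) := by
        rw [hc]
        by_cases h0 : (pre ++ r.reverse).count s = 0
        · simp [h0]
        · rw [if_neg h0, if_neg (by exact_mod_cast h0)]
      simp only [List.foldl_cons]
      show (List.foldl _ (acc ++ [if d.getD s 0 - 1 = 0 then s
          else s ++ "_" ++ PySem.Int.toStr (d.getD s 0 - 1)], d.insert s (d.getD s 0 - 1)) r).1 = _
      rw [ih pre (acc ++ [_]) (d.insert s (d.getD s 0 - 1)) ?_]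
      · rw [hname, hrev, renameFrom_append, List.reverse_append, List.reverse_singleton,
          List.singleton_append, List.append_assoc, List.singleton_append]
      · intro x
        rw [PySem.Dict.getD_insert]
        by_cases hx : x = s
        · subst hx; rw [if_pos rfl, hc]
        · rw [if_neg hx, hinv x, hrev, ← List.append_assoc, List.count_append]
          simp [Ne.symm hx]

theorem b_eq (l : List String) : rename_duplicates_alt l = renameFrom [] l := by
  have hd : ∀ x, (l.foldl (fun (d : PySem.Dict String Int) s => d.insert s (d.getD s 0 + 1))
      PySem.Dict.empty).getD x 0 = (([] ++ l.reverse.reverse).count x : Int) := by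
    intro x
    rw [counter_inv]
    simp [PySem.Dict.getD, PySem.Dict.get?, PySem.Dict.empty]
  show ((l.reverse.foldl
      (fun (st : List String × PySem.Dict String Int) s =>
        let c := st.2.getD s 0 - 1
        (st.1 ++ [if c = 0 then s else s ++ "_" ++ PySem.Int.toStr c], st.2.insert s c))
      ([], l.foldl (fun (d : PySem.Dict String Int) s => d.insert s (d.getD s 0 + 1))
        PySem.Dict.empty)).1).reverse = renameFrom [] l
  rw [rev_loop l.reverse [] [] _ hd]
  simp

-- ===== VERDICT =====
theorem rename_duplicates_spec : Claim_equal_rename_duplicates := by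
  intro strings _
  unfold Spec_rename_duplicates
  rw [a_eq, b_eq]
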